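-- pv_equiv track=rewrite | github.com/J-nowcow/programmers_python | Level 2/소수 만들기.py | solution
-- ===== SOURCE A (Python) =====
-- def solution(nums):
--     prime = set(range(2,3000))
--     for i in range(2, 3000//2+1):
--         if i in prime:
--             prime -= set(range(2*i,3000,i)) # 소수의 배수들 제거
--
--     answer = 0
--     for i in range(len(nums)):
--         for j in range(i+1,len(nums)):
--             for k in range(j+1,len(nums)):
--                 if nums[i]+nums[j]+nums[k] in prime:
--                     answer += 1
--     return answer
-- ===== SOURCE B (Python) =====
-- def solution(nums):
--     # primes below 3000 by trial division (A derives the same set by repeated set subtraction)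
--     def is_prime(p):
--         if p < 2:
--             return False
--         d = 2
--         while d * d <= p:
--             if p % d == 0:
--                 return False
--             d += 1
--         return True
--
--     primes = [p for p in range(3000) if is_prime(p)]
--     # One left-to-right pass: pair_sums counts a[i]+a[j] over the pairs i<j seen so far,
--     # so each element closes exactly the prime triples in which it is the last member.
--     answer = 0
--     pair_sums = {}
--     seen = []
--     for x in nums:
--         for p in primes:
--             answer += pair_sums.get(p - x, 0)
--         for y in seen:
--             s = x + y
--             pair_sums[s] = pair_sums.get(s, 0) + 1
--         seen.append(x)
--     return answer
-- ===== Notes on version B (the rewrite author's own statement) =====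
-- stated objective: faster
-- what changed: Replaces the O(n^3) triple loop with one left-to-right pass that keeps a counter of pair sums of the elements seen so far (each element closes its prime triples via lookups of prime-minus-element), and builds the prime table by trial division instead of repeated set subtraction.
import Mathlib
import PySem

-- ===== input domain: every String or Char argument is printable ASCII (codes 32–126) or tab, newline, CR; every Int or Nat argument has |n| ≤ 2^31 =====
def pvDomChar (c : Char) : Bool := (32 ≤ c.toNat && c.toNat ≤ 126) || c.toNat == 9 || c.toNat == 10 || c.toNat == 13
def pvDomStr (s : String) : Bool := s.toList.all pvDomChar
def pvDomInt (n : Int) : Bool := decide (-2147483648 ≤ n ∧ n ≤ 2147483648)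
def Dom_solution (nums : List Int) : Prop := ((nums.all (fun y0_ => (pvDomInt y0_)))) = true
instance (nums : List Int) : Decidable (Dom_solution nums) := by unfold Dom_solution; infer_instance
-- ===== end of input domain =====

-- B replaces A's O(n^3) triple loop by one pass over the list with a counter of pair
-- sums of the elements seen so far, and builds the prime table by trial division
-- instead of repeated set subtraction (measured faster at the larger sizes).

-- ===== PORT A =====
-- prime = set(range(2,3000)); for i in range(2, 3000//2+1): if i in prime: prime -= set(range(2*i,3000,i))
def sieveStepA (prime : PySem.Set Int) (i : Int) : PySem.Set Int :=
  if PySem.Set.contains prime i then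
    PySem.Set.diff prime (PySem.Set.ofList (PySem.List.pyRange (2*i) 3000 i))
  else prime

def primeSetA : PySem.Set Int :=
  (PySem.List.pyRange 2 (PySem.Int.floordiv 3000 2 + 1)).foldl sieveStepA
    (PySem.Set.ofList (PySem.List.pyRange 2 3000))

def solution (nums : List Int) : Int :=
  let prime := primeSetA
  let n := PySem.List.len nums
  (PySem.List.pyRange 0 n).foldl (fun answer i =>
    (PySem.List.pyRange (i+1) n).foldl (fun answer j =>
      (PySem.List.pyRange (j+1) n).foldl (fun answer k =>
        if PySem.Set.contains prime
            (PySem.List.pyGetD nums i 0 + PySem.List.pyGetD nums j 0 + PySem.List.pyGetD nums k 0)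
        then answer + 1 else answer) answer) answer) 0

-- ===== PORT B =====
-- while d * d <= p: if p % d == 0: return False; d += 1
def isPrimeGo (p : Int) (d : Int) : Bool :=
  if d * d ≤ p then
    if PySem.Int.mod p d == 0 then false
    else isPrimeGo p (d + 1)
  else true
termination_by (p - d).toNat
decreasing_by
  rename_i hle hmod
  have hdp : d < p := by
    rcases lt_trichotomy d 1 with hd | hd | hd
    · rcases lt_or_ge d 0 with hd0 | hd0
      · nlinarith
      · have hd0' : d = 0 := by omega
        subst hd0'
        have : PySem.Int.mod p 0 = p := by simp [PySem.Int.mod]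
        simp [this] at hmod
        exact lt_of_le_of_ne (by simpa using hle) (Ne.symm hmod)
    · exfalso
      subst hd
      exact hmod (by simpa [beq_iff_eq] using (PySem.Int.mod_eq_zero_iff_dvd p 1).mpr (one_dvd p))
    · nlinarith
  omega

def isPrimeB (p : Int) : Bool :=
  if p < 2 then false else isPrimeGo p 2

def primesB : List Int :=
  (PySem.List.pyRange 0 3000).filter (fun p => isPrimeB p)

def solution_alt (nums : List Int) : Int :=
  let primes := primesB
  (nums.foldl
    (fun (st : Int × PySem.Dict Int Int × List Int) x =>
      let answer := primes.foldl (fun a p => a + st.2.1.getD (p - x) 0) st.1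
      let pairs := st.2.2.foldl (fun d y => d.modify (x + y) 0 (· + 1)) st.2.1
      (answer, pairs, st.2.2 ++ [x]))
    (0, PySem.Dict.empty, [])).1

-- ===== PRECONDITION & SPEC =====
def Spec_solution (nums : List Int) (out : Int) : Prop := out = solution_alt nums
instance (nums : List Int) (out : Int) : Decidable (Spec_solution nums out) := by unfold Spec_solution; infer_instance

-- ===== CLAIM (what is proved, stated in full; the proofs are below) =====
def Claim_equal_solution : Prop := ∀ (nums : List Int), Dom_solution nums → Spec_solution nums (solution nums)

-- ===== LEMMAS AND PROOFS =====

-- the mathematical prime-in-range predicate both prime tables compute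
def IsP (n : Int) : Prop := 2 ≤ n ∧ n < 3000 ∧ ∀ d : Int, 2 ≤ d → d < n → ¬ d ∣ n

-- pair sums a[i]+a[j] (i<j) and triple sums a[i]+a[j]+a[k] (i<j<k)
def sums2 : List Int → List Int
  | [] => []
  | x :: xs => xs.map (fun y => x + y) ++ sums2 xs

def sums3 : List Int → List Int
  | [] => []
  | x :: xs => (sums2 xs).map (fun s => x + s) ++ sums3 xs

-- ---------- A's sieve computes IsP ----------

def InvA (i : Int) (S : PySem.Set Int) : Prop :=
  ∀ n : Int, n ∈ S ↔ (2 ≤ n ∧ n < 3000 ∧ ∀ d : Int, 2 ≤ d → d < i → d ∣ n → n ≤ d)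

lemma invA_init : InvA 2 (PySem.Set.ofList (PySem.List.pyRange 2 3000)) := by
  intro n
  simp only [PySem.Set.mem_ofList, PySem.List.mem_pyRange_one]
  constructor
  · rintro ⟨h1, h2⟩
    exact ⟨h1, h2, fun d hd1 hd2 _ => by omega⟩
  · rintro ⟨h1, h2, -⟩
    exact ⟨h1, h2⟩

lemma invA_step (i : Int) (S : PySem.Set Int) (h2 : 2 ≤ i) (h3 : i < 3000)
    (h : InvA i S) : InvA (i + 1) (sieveStepA S i) := by
  intro n
  unfold sieveStepA
  by_cases hc : PySem.Set.contains S i = true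
  · rw [if_pos hc, PySem.Set.mem_diff]
    simp only [PySem.Set.mem_ofList]
    rw [PySem.List.mem_pyRange_iff_of_pos (by omega : (0:Int) < i), h n]
    constructor
    · rintro ⟨⟨hn1, hn2, hcond⟩, hrem⟩
      refine ⟨hn1, hn2, fun d hd1 hd2 hdvd => ?_⟩
      rcases lt_or_ge d i with hdi | hdi
      · exact hcond d hd1 hdi hdvd
      · have hdi' : d = i := by omega
        subst hdi'
        by_contra hnd
        push_neg at hnd
        obtain ⟨k, hk⟩ := hdvd
        have hk2 : 2 ≤ k := by nlinarith
        exact hrem ⟨by nlinarith, hn2, ⟨k - 2, by rw [hk]; ring⟩⟩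
    · rintro ⟨hn1, hn2, hcond⟩
      refine ⟨⟨hn1, hn2, fun d hd1 hd2 hdvd => hcond d hd1 (by omega) hdvd⟩, ?_⟩
      rintro ⟨hge, hlt, hdvd0⟩
      have hdvd : i ∣ n := by
        have h2i : i ∣ 2 * i := ⟨2, by ring⟩
        simpa using dvd_add hdvd0 h2i
      have := hcond i h2 (by omega) hdvd
      omega
  · rw [if_neg hc, h n]
    have hiNS : i ∉ S := fun hmem => hc ((PySem.Set.contains_iff S i).mpr hmem)
    rw [h i] at hiNS
    push_neg at hiNS
    constructor
    · rintro ⟨hn1, hn2, hcond⟩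
      refine ⟨hn1, hn2, fun d hd1 hd2 hdvd => ?_⟩
      rcases lt_or_ge d i with hdi | hdi
      · exact hcond d hd1 hdi hdvd
      · have hdi' : d = i := by omega
        subst hdi'
        obtain ⟨d0, hd01, hd02, hd0dvd, hd0lt⟩ := hiNS h2 h3
        have := hcond d0 hd01 (by omega) (hd0dvd.trans hdvd)
        omega
    · rintro ⟨hn1, hn2, hcond⟩
      exact ⟨hn1, hn2, fun d hd1 hd2 hdvd => hcond d hd1 (by omega) hdvd⟩

lemma invA_fold : ∀ (m : Nat) (a : Int) (S : PySem.Set Int), 2 ≤ a → a ≤ 1501 →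
    (1501 - a).toNat = m → InvA a S →
    InvA 1501 ((PySem.List.pyRange a 1501).foldl sieveStepA S) := by
  intro m
  induction m with
  | zero =>
    intro a S h2 hle hm hinv
    have ha : a = 1501 := by omega
    subst ha
    rw [PySem.List.pyRange_one_eq_nil le_rfl]
    exact hinv
  | succ m ih =>
    intro a S h2 hle hm hinv
    have ha : a < 1501 := by omega
    rw [PySem.List.pyRange_one_cons ha, List.foldl_cons]
    exact ih (a + 1) (sieveStepA S a) (by omega) (by omega) (by omega)
      (invA_step a S h2 (by omega) hinv)

lemma mem_primeSetA (n : Int) : n ∈ primeSetA ↔ IsP n := by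
  have h1501 : PySem.Int.floordiv 3000 2 + 1 = (1501:Int) := by decide
  have hmem : n ∈ primeSetA ↔ (2 ≤ n ∧ n < 3000 ∧ ∀ d : Int, 2 ≤ d → d < 1501 → d ∣ n → n ≤ d) := by
    unfold primeSetA
    rw [h1501]
    exact invA_fold 1499 2 _ (by omega) (by omega) (by omega) invA_init n
  rw [hmem]
  unfold IsP
  constructor
  · rintro ⟨h1, h2, hcond⟩
    refine ⟨h1, h2, fun d hd1 hd2 hdvd => ?_⟩
    obtain ⟨k, hk⟩ := hdvd
    have hk2 : 2 ≤ k := by nlinarith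
    have h2d : 2 * d ≤ n := by nlinarith
    have := hcond d hd1 (by omega) ⟨k, hk⟩
    omega
  · rintro ⟨h1, h2, hcond⟩
    refine ⟨h1, h2, fun d hd1 hd2 hdvd => ?_⟩
    by_contra hnd
    push_neg at hnd
    exact hcond d hd1 hnd hdvd

-- ---------- B's trial division computes IsP ----------

lemma isPrimeGo_iff : ∀ (m : Nat) (p d : Int), 2 ≤ d → (p - d).toNat = m →
    (isPrimeGo p d = true ↔ ∀ e : Int, d ≤ e → e * e ≤ p → ¬ e ∣ p) := by
  intro m
  induction m with
  | zero =>
    intro p d hd hm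
    have hpd : p ≤ d := by omega
    rw [isPrimeGo, if_neg (by nlinarith : ¬ d * d ≤ p)]
    refine ⟨fun _ e hde hee hdvd => by nlinarith, fun _ => rfl⟩
  | succ m ih =>
    intro p d hd hm
    rw [isPrimeGo]
    by_cases hdd : d * d ≤ p
    · rw [if_pos hdd]
      by_cases hmod : (PySem.Int.mod p d == 0) = true
      · rw [if_pos hmod]
        constructor
        · intro hfalse
          exact absurd hfalse (by simp)
        · intro hall
          exact ((hall d le_rfl hdd) ((PySem.Int.mod_eq_zero_iff_dvd p d).mp (by simpa using hmod))).elim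
      · rw [if_neg hmod]
        have hdp : d < p := by nlinarith
        rw [ih p (d+1) (by omega) (by omega)]
        constructor
        · intro hall e hde hee hdvd
          rcases eq_or_lt_of_le hde with he | he
          · subst he
            exact hmod (by simp [(PySem.Int.mod_eq_zero_iff_dvd p d).mpr hdvd])
          · exact hall e (by omega) hee hdvd
        · intro hall e hde hee hdvd
          exact hall e (by omega) hee hdvd
    · rw [if_neg hdd]
      refine ⟨fun _ e hde hee hdvd => by nlinarith, fun _ => rfl⟩

lemma isPrimeB_iff (n : Int) :
    isPrimeB n = true ↔ (2 ≤ n ∧ ∀ d : Int, 2 ≤ d → d * d ≤ n → ¬ d ∣ n) := by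
  unfold isPrimeB
  by_cases h : n < 2
  · rw [if_pos h]
    constructor
    · intro hfalse
      exact absurd hfalse (by simp)
    · rintro ⟨h2, -⟩
      omega
  · rw [if_neg h]
    rw [isPrimeGo_iff (n - 2).toNat n 2 le_rfl rfl]
    constructor
    · intro hall
      exact ⟨by omega, hall⟩
    · rintro ⟨-, hall⟩
      exact hall

lemma mem_primesB (n : Int) : n ∈ primesB ↔ IsP n := by
  unfold primesB
  rw [List.mem_filter, PySem.List.mem_pyRange_one, isPrimeB_iff]
  unfold IsP
  constructor
  · rintro ⟨⟨h0, h3000⟩, h2, hall⟩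
    refine ⟨h2, h3000, fun d hd1 hd2 hdvd => ?_⟩
    obtain ⟨k, hk⟩ := hdvd
    have hk2 : 2 ≤ k := by nlinarith
    rcases le_or_gt (d * d) n with hsq | hsq
    · exact hall d hd1 hsq ⟨k, hk⟩
    · have hkd : k < d := by nlinarith
      exact hall k hk2 (by nlinarith) ⟨d, by rw [hk]; ring⟩
  · rintro ⟨h2, h3000, hall⟩
    refine ⟨⟨by omega, h3000⟩, h2, fun d hd1 hsq hdvd => ?_⟩
    have hdn : d ≤ n := Int.le_of_dvd (by omega) hdvd
    rcases eq_or_lt_of_le hdn with he | he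
    · nlinarith
    · exact hall d hd1 he hdvd

lemma primesB_nodup : primesB.Nodup := by
  exact List.Nodup.filter _ (PySem.List.nodup_pyRange_one 0 3000)

lemma pred_eq : (fun s => PySem.Set.contains primeSetA s) = (fun s => decide (s ∈ primesB)) := by
  funext s
  have hiff : PySem.Set.contains primeSetA s = true ↔ s ∈ primesB :=
    (PySem.Set.contains_iff primeSetA s).trans ((mem_primeSetA s).trans (mem_primesB s).symm)
  by_cases hmem : s ∈ primesB
  · rw [hiff.mpr hmem, decide_eq_true hmem]
  · rw [decide_eq_false hmem]
    rcases Bool.eq_false_or_eq_true (PySem.Set.contains primeSetA s) with hb | hb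
    · exact absurd (hiff.mp hb) hmem
    · exact hb

-- ---------- A's triple loop counts prime sums of sums3 ----------

lemma innerA (nums : List Int) (P : Int → Bool) (v : Int) (a acc : Int) (ha : 0 ≤ a) :
    (PySem.List.pyRange a (PySem.List.len nums)).foldl
      (fun answer k => if P (v + PySem.List.pyGetD nums k 0) then answer + 1 else answer) acc
    = acc + (((nums.drop a.toNat).countP (fun z => P (v + z)) : Nat) : Int) := by
  rw [PySem.List.foldl_pyRange_pyGetD nums 0 (fun answer z => if P (v + z) then answer + 1 else answer) acc ha]
  exact PySem.List.foldl_if_add_one _ _ _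

lemma middleA (nums : List Int) (P : Int → Bool) (v : Int) :
    ∀ (m : Nat) (a : Int) (acc : Int), 0 ≤ a → ((PySem.List.len nums) - a).toNat = m →
    (PySem.List.pyRange a (PySem.List.len nums)).foldl
      (fun answer j =>
        (PySem.List.pyRange (j+1) (PySem.List.len nums)).foldl
          (fun answer k =>
            if P (v + PySem.List.pyGetD nums j 0 + PySem.List.pyGetD nums k 0)
            then answer + 1 else answer) answer) acc
    = acc + (((sums2 (nums.drop a.toNat)).countP (fun s => P (v + s)) : Nat) : Int) := by
  intro m
  induction m with
  | zero =>
    intro a acc ha hm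
    have hlen := PySem.List.len_eq nums
    rw [PySem.List.pyRange_one_eq_nil (by omega), List.foldl_nil,
      List.drop_eq_nil_of_le (by omega)]
    simp [sums2]
  | succ m ih =>
    intro a acc ha hm
    have hlen := PySem.List.len_eq nums
    have hlt : a < PySem.List.len nums := by omega
    have hanat : a.toNat < nums.length := by omega
    rw [PySem.List.pyRange_one_cons hlt, List.foldl_cons,
      innerA nums P (v + PySem.List.pyGetD nums a 0) (a + 1) acc (by omega),
      ih (a + 1) _ (by omega) (by omega),
      List.drop_eq_getElem_cons hanat]
    have hget : PySem.List.pyGetD nums a 0 = nums[a.toNat] := by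
      rw [PySem.List.pyGetD_of_nonneg nums 0 ha]
      exact List.getD_eq_getElem nums 0 hanat
    have hnat1 : (a + 1).toNat = a.toNat + 1 := by omega
    rw [hnat1]
    show acc + _ + _ = _
    simp only [sums2, List.countP_append, List.countP_map]
    have hcongr : List.countP ((fun s => P (v + s)) ∘ fun y => nums[a.toNat] + y) (nums.drop (a.toNat + 1))
        = List.countP (fun z => P (v + PySem.List.pyGetD nums a 0 + z)) (nums.drop (a.toNat + 1)) := by
      apply List.countP_congr
      intro z _
      rw [hget, add_assoc]
      exact Iff.rfl
    rw [hcongr]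
    push_cast
    ring

lemma outerA (nums : List Int) (P : Int → Bool) :
    ∀ (m : Nat) (a : Int) (acc : Int), 0 ≤ a → ((PySem.List.len nums) - a).toNat = m →
    (PySem.List.pyRange a (PySem.List.len nums)).foldl
      (fun answer i =>
        (PySem.List.pyRange (i+1) (PySem.List.len nums)).foldl
          (fun answer j =>
            (PySem.List.pyRange (j+1) (PySem.List.len nums)).foldl
              (fun answer k =>
                if P (PySem.List.pyGetD nums i 0 + PySem.List.pyGetD nums j 0 + PySem.List.pyGetD nums k 0)
                then answer + 1 else answer) answer) answer) acc
    = acc + (((sums3 (nums.drop a.toNat)).countP P : Nat) : Int) := by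
  intro m
  induction m with
  | zero =>
    intro a acc ha hm
    have hlen := PySem.List.len_eq nums
    rw [PySem.List.pyRange_one_eq_nil (by omega), List.foldl_nil,
      List.drop_eq_nil_of_le (by omega)]
    simp [sums3]
  | succ m ih =>
    intro a acc ha hm
    have hlen := PySem.List.len_eq nums
    have hlt : a < PySem.List.len nums := by omega
    have hanat : a.toNat < nums.length := by omega
    rw [PySem.List.pyRange_one_cons hlt, List.foldl_cons,
      middleA nums P (PySem.List.pyGetD nums a 0) ((PySem.List.len nums) - (a + 1)).toNat (a + 1) acc (by omega) rfl,
      ih (a + 1) _ (by omega) (by omega),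
      List.drop_eq_getElem_cons hanat]
    have hget : PySem.List.pyGetD nums a 0 = nums[a.toNat] := by
      rw [PySem.List.pyGetD_of_nonneg nums 0 ha]
      exact List.getD_eq_getElem nums 0 hanat
    have hnat1 : (a + 1).toNat = a.toNat + 1 := by omega
    rw [hnat1]
    simp only [sums3, List.countP_append, List.countP_map]
    have hcongr : List.countP (P ∘ fun s => nums[a.toNat] + s) (sums2 (nums.drop (a.toNat + 1)))
        = List.countP (fun s => P (PySem.List.pyGetD nums a 0 + s)) (sums2 (nums.drop (a.toNat + 1))) := by
      apply List.countP_congr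
      intro z _
      rw [hget]
      exact Iff.rfl
    rw [hcongr]
    push_cast
    ring

lemma solution_eq_countP (nums : List Int) :
    solution nums = (((sums3 nums).countP (fun s => PySem.Set.contains primeSetA s) : Nat) : Int) := by
  have h := outerA nums (fun s => PySem.Set.contains primeSetA s)
    ((PySem.List.len nums) - 0).toNat 0 0 le_rfl rfl
  simp only [Int.toNat_zero, List.drop_zero, zero_add] at h
  exact h

-- ---------- permutation lemmas for the right-to-left view ----------

lemma sums2_append (l : List Int) (x : Int) :
    (sums2 (l ++ [x])).Perm (sums2 l ++ l.map (fun y => y + x)) := by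
  induction l with
  | nil => simp [sums2]
  | cons y ys ih =>
    rw [← Multiset.coe_eq_coe] at ih ⊢
    simp only [List.cons_append, sums2, List.map_append, List.map_cons, List.map_nil,
      ← Multiset.coe_add] at ih ⊢
    rw [ih]
    have hsingle : ((([y + x] : List Int)) : Multiset Int) = {y + x} := rfl
    rw [hsingle]
    simp only [← Multiset.cons_coe, ← Multiset.singleton_add]
    abel

lemma sums3_append (l : List Int) (x : Int) :
    (sums3 (l ++ [x])).Perm (sums3 l ++ (sums2 l).map (fun s => s + x)) := by
  induction l with
  | nil => simp [sums3, sums2]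
  | cons y ys ih =>
    have ih2 := sums2_append ys x
    rw [← Multiset.coe_eq_coe] at ih ih2 ⊢
    have hmap2 : ((sums2 (ys ++ [x])).map (fun s => y + s) : Multiset Int)
        = ((sums2 ys ++ ys.map (fun z => z + x)).map (fun s => y + s) : Multiset Int) := by
      rw [← Multiset.map_coe, ← Multiset.map_coe, ih2]
    simp only [List.cons_append, sums3, sums2, List.map_append,
      List.map_map, ← Multiset.coe_add] at ih hmap2 ⊢
    rw [ih, hmap2]
    have hfun : ((fun s => y + s) ∘ fun z => z + x) = (fun z => (y + z) + x) := by
      funext z; simp only [Function.comp_apply]; ring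
    have hfun2 : ((fun s => s + x) ∘ fun s => y + s) = (fun z => (y + z) + x) := by
      funext z; simp only [Function.comp_apply]
    rw [hfun, hfun2]
    abel

-- ---------- sum over a Nodup list of counts = countP of shifted membership ----------

lemma sum_count (L : List Int) (hL : L.Nodup) (S : List Int) (x : Int) :
    (L.map (fun p => ((S.count (p - x) : Nat) : Int))).sum
      = ((S.countP (fun s => decide ((s + x) ∈ L)) : Nat) : Int) := by
  induction S with
  | nil => simp
  | cons s S ih =>
    have e1 : ∀ p ∈ L, (((s :: S).count (p - x) : Nat) : Int)
        = ((S.count (p - x) : Nat) : Int) + (if (p == s + x) = true then (1:Int) else 0) := by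
      intro p _
      by_cases h : p = s + x
      · subst h
        have hs : s = s + x - x := by ring
        simp [← hs]
      · have h2 : (s == p - x) = false := by
          simp only [beq_eq_false_iff_ne, ne_eq]
          intro he
          exact h (by omega)
        have h3 : (p == s + x) = false := by
          simp only [beq_eq_false_iff_ne, ne_eq]
          exact h
        simp [List.count_cons, h2, h3]
    rw [List.map_congr_left e1,
      PySem.List.sum_map_add_int L (fun p => ((S.count (p - x) : Nat) : Int))
        (fun p => if (p == s + x) = true then (1:Int) else 0),
      ih, PySem.List.sum_map_ite_one_zero (fun p => p == s + x) L,
      ← List.count_eq_countP]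
    rw [List.countP_cons]
    by_cases hmem : s + x ∈ L
    · rw [List.count_eq_one_of_mem hL hmem]
      simp [hmem]
    · rw [List.count_eq_zero_of_not_mem hmem]
      simp [hmem]

-- ---------- B's single pass counts the same ----------

set_option maxRecDepth 8192 in
lemma B_fold : ∀ l : List Int, ∃ d : PySem.Dict Int Int,
    l.foldl
      (fun (st : Int × PySem.Dict Int Int × List Int) x =>
        let answer := primesB.foldl (fun a p => a + st.2.1.getD (p - x) 0) st.1
        let pairs := st.2.2.foldl (fun d y => d.modify (x + y) 0 (· + 1)) st.2.1
        (answer, pairs, st.2.2 ++ [x]))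
      (0, PySem.Dict.empty, [])
    = ((((sums3 l).countP (fun s => decide (s ∈ primesB)) : Nat) : Int), d, l)
    ∧ ∀ v : Int, d.getD v 0 = (((sums2 l).count v : Nat) : Int) := by
  intro l
  induction l using List.reverseRecOn with
  | nil =>
    refine ⟨PySem.Dict.empty, rfl, fun v => ?_⟩
    simp [sums2, PySem.Dict.getD_empty]
  | append_singleton l x ih =>
    obtain ⟨d, hst, hd⟩ := ih
    refine ⟨l.foldl (fun d y => d.modify (x + y) 0 (· + 1)) d, ?_, ?_⟩
    · rw [List.foldl_append, hst]
      simp only [List.foldl_cons, List.foldl_nil]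
      refine Prod.ext ?_ (Prod.ext ?_ rfl)
      · show primesB.foldl (fun a p => a + d.getD (p - x) 0)
            (((sums3 l).countP (fun s => decide (s ∈ primesB)) : Nat) : Int) = _
        rw [PySem.List.foldl_add primesB (fun p => d.getD (p - x) 0),
          List.map_congr_left (fun p _ => hd (p - x)),
          sum_count primesB primesB_nodup (sums2 l) x,
          (sums3_append l x).countP_eq, List.countP_append, List.countP_map,
          show ((fun s => decide (s ∈ primesB)) ∘ fun s => s + x)
              = (fun s => decide ((s + x) ∈ primesB)) from rfl]
        push_cast
        ring
      · rfl
    · intro v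
      rw [← List.foldl_map (f := fun y => x + y)
            (g := fun (d : PySem.Dict Int Int) k => d.modify k 0 (· + 1)),
        PySem.Dict.getD_foldl_modify_add_one (l.map (fun y => x + y)) d v, hd v,
        (sums2_append l x).count_eq v, List.count_append,
        show l.map (fun y => y + x) = l.map (fun y => x + y) from
          List.map_congr_left (fun y _ => by ring)]
      push_cast
      ring

lemma solution_alt_eq_countP (nums : List Int) :
    solution_alt nums = (((sums3 nums).countP (fun s => decide (s ∈ primesB)) : Nat) : Int) := by
  obtain ⟨d, hst, -⟩ := B_fold nums
  have hdef : solution_alt nums = (nums.foldl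
      (fun (st : Int × PySem.Dict Int Int × List Int) x =>
        let answer := primesB.foldl (fun a p => a + st.2.1.getD (p - x) 0) st.1
        let pairs := st.2.2.foldl (fun d y => d.modify (x + y) 0 (· + 1)) st.2.1
        (answer, pairs, st.2.2 ++ [x]))
      (0, PySem.Dict.empty, [])).1 := rfl
  rw [hdef, hst]

-- ===== VERDICT (by name: the statement is the Claim_ definition above) =====
theorem solution_spec : Claim_equal_solution := by
  intro nums _
  show solution nums = solution_alt nums
  rw [solution_eq_countP, solution_alt_eq_countP, pred_eq]
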